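-- pv_equiv track=rewrite | github.com/Grupo15DALGO/TallerClase | Ejercicio1.py | aereopuertos
-- ===== SOURCE A (Python) =====
-- def encontrar(padre, i):
--     if padre[i] == i:
--         return i
--     return encontrar(padre, padre[i])
--
-- def union(padre, rango, x, y):
--     x_raiz = encontrar(padre, x)
--     y_raiz = encontrar(padre, y)
--
--     if rango[x_raiz] < rango[y_raiz]:
--         padre[x_raiz] = y_raiz
--     elif rango[x_raiz] > rango[y_raiz]:
--         padre[y_raiz] = x_raiz
--     else:
--         padre[y_raiz] = x_raiz
--         rango[x_raiz] += 1
--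
-- def kruskal(vertices, aristas):
--     resultado = []
--
--     aristas = sorted(aristas, key=lambda item: item[2])
--
--     padre = list(range(vertices + 1))
--     rango = [0] * (vertices + 1)
--
--     e = 0
--     i = 0
--
--     while e < vertices - 1 and i < len(aristas):
--         u, v, w = aristas[i]
--         i = i + 1
--         x = encontrar(padre, u)
--         y = encontrar(padre, v)
--
--         if x != y:
--             e = e + 1
--             resultado.append((u, v, w))
--             union(padre, rango, x, y)
--
--     suma = 0
--     for arista in resultado:
--         suma += arista[2]
--     return suma, len(resultado)
--
-- def bfs(grafo, inicio, nodos_a_visitar):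
--     visitados = set()
--     cola = [inicio]
--     visitados.add(inicio)
--     while cola:
--         nodo = cola.pop(0)
--         for arista in grafo:
--             u, v, _ = arista
--             if u == nodo:
--                 vecino = v
--             elif v == nodo:
--                 vecino = u
--             else:
--                 continue
--             if vecino not in visitados:
--                 cola.append(vecino)
--                 visitados.add(vecino)
--     nodos_no_visitados = [nodo for nodo in nodos_a_visitar if nodo not in visitados]
--     return nodos_no_visitados
--
-- def aereopuertos(destinos, cost, lista_aristas):
--     lista=[]
--     for i in range(1,destinos+1):
--         lista.append(i)
--
--     desconectados=bfs(lista_aristas, lista_aristas[0][0], lista)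
--     costo=0
--     num=0
--     for location in desconectados:
--         costo+=cost
--         num+=1
--     total=destinos-len(desconectados)
--     costo_tree, num_airports = kruskal(len(lista), lista_aristas)
--     costo += costo_tree + cost
--     return costo, num
-- ===== SOURCE B (Python) =====
-- # B: same result, but connectivity is computed by BFS over an adjacency dict with an
-- # index-advancing queue (O(V+E)) instead of rescanning the whole edge list for every
-- # dequeued node, and Kruskal accumulates (weight, count) directly instead of building
-- # the result list and re-summing it; the cost is a closed form cost*num.
--
-- def _find(padre, i):
--     while padre[i] != i:
--         i = padre[i]
--     return i
--
-- def _union(padre, rango, x, y):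
--     x_raiz = _find(padre, x)
--     y_raiz = _find(padre, y)
--     if rango[x_raiz] < rango[y_raiz]:
--         padre[x_raiz] = y_raiz
--     elif rango[x_raiz] > rango[y_raiz]:
--         padre[y_raiz] = x_raiz
--     else:
--         padre[y_raiz] = x_raiz
--         rango[x_raiz] += 1
--
-- def aereopuertos(destinos, cost, lista_aristas):
--     adj = {}
--     for u, v, _ in lista_aristas:
--         adj.setdefault(u, []).append(v)
--         adj.setdefault(v, []).append(u)
--     inicio = lista_aristas[0][0]
--     visitados = {inicio}
--     cola = [inicio]
--     head = 0
--     while head < len(cola):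
--         nodo = cola[head]
--         head += 1
--         for vecino in adj[nodo]:
--             if vecino not in visitados:
--                 visitados.add(vecino)
--                 cola.append(vecino)
--     num = sum(1 for nodo in range(1, destinos + 1) if nodo not in visitados)
--
--     padre = list(range(destinos + 1))
--     rango = [0] * (destinos + 1)
--     total = 0
--     escogidas = 0
--     for u, v, w in sorted(lista_aristas, key=lambda a: a[2]):
--         if escogidas >= destinos - 1:
--             break
--         x = _find(padre, u)
--         y = _find(padre, v)
--         if x != y:
--             _union(padre, rango, x, y)
--             total += w
--             escogidas += 1
--     return cost * num + total + cost, num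
-- ===== Notes on version B (the rewrite author's own statement) =====
-- stated objective: faster
-- what changed: The connectivity pass builds an adjacency dict once and BFS-walks it with an index-advancing queue (O(V+E)) instead of rescanning the entire edge list for every dequeued node and popping from the front of a list (O(V*E)), Kruskal accumulates the (weight, count) pair directly instead of building a result edge list and re-summing it, and the disconnected-airport cost is the closed form cost*num instead of a per-node accumulation loop.
-- outside the precondition, e.g. on aereopuertos(2, 7, [(1, 2, 1), (99, 1, 5)]): A returns (8, 0), B returns (8, 0)
import Mathlib
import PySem

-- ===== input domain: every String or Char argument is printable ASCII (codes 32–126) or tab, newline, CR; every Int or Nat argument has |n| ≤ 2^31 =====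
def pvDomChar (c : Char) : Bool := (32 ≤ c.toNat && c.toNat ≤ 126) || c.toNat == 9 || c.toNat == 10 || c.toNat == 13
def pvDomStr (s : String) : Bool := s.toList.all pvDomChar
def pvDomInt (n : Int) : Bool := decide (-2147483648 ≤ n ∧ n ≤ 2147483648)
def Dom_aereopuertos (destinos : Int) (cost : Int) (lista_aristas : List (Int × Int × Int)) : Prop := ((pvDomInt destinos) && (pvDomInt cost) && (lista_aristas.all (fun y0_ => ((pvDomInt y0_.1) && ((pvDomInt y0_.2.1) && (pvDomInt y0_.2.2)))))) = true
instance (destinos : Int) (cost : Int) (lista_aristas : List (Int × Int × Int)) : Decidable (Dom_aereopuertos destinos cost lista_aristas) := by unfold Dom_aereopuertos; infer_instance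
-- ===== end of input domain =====

-- B replaces A's per-node rescans of the whole edge list (and its rebuilt result list)
-- by an adjacency-dict BFS with an index-advancing queue and a directly accumulated
-- (weight, count) Kruskal; objective: faster (asymptotically, O(V+E) connectivity).

-- ===== PORT A =====

-- encontrar(padre, i): Python recursion; fuel (always called with padre.length, which
-- bounds union-by-rank chain length) is an implementation detail of the port.
def encontrar : Nat → List Int → Int → Int
  | 0, _, i => i
  | fuel+1, padre, i =>
    if PySem.List.pyGetD padre i 0 = i then i
    else encontrar fuel padre (PySem.List.pyGetD padre i 0)

def unionUF (padre rango : List Int) (x y : Int) : List Int × List Int :=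
  let x_raiz := encontrar padre.length padre x
  let y_raiz := encontrar padre.length padre y
  if PySem.List.pyGetD rango x_raiz 0 < PySem.List.pyGetD rango y_raiz 0 then
    (PySem.List.pySetD padre x_raiz y_raiz, rango)
  else if PySem.List.pyGetD rango y_raiz 0 < PySem.List.pyGetD rango x_raiz 0 then
    (PySem.List.pySetD padre y_raiz x_raiz, rango)
  else
    (PySem.List.pySetD padre y_raiz x_raiz,
     PySem.List.pySetD rango x_raiz (PySem.List.pyGetD rango x_raiz 0 + 1))

-- the 'while e < vertices - 1 and i < len(aristas)' loop of kruskal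
def kruskalLoop (vertices : Int) : List (Int × Int × Int) → List Int → List Int → Int →
    List (Int × Int × Int) → List (Int × Int × Int)
  | [], _, _, _, resultado => resultado
  | (u, v, w) :: tl, padre, rango, e, resultado =>
    if e < vertices - 1 then
      let x := encontrar padre.length padre u
      let y := encontrar padre.length padre v
      if x ≠ y then
        let pr := unionUF padre rango x y
        kruskalLoop vertices tl pr.1 pr.2 (e + 1) (resultado ++ [(u, v, w)])
      else kruskalLoop vertices tl padre rango e resultado
    else resultado

def kruskalA (vertices : Int) (aristas : List (Int × Int × Int)) : Int × Int :=
  let aristas' := PySem.List.sorted aristas (fun item => item.2.2) false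
  let padre := PySem.List.pyRange 0 (vertices + 1) 1
  let rango := PySem.List.pyRepeat [(0 : Int)] (vertices + 1)
  let resultado := kruskalLoop vertices aristas' padre rango 0 []
  (resultado.foldl (fun suma arista => suma + arista.2.2) 0, PySem.List.len resultado)

-- the 'for arista in grafo' scan of bfs's while body
def bfsScan (grafo : List (Int × Int × Int)) (nodo : Int) (st : List Int × PySem.Set Int) :
    List Int × PySem.Set Int :=
  grafo.foldl (fun st' arista =>
    if arista.1 = nodo then
      if PySem.Set.contains st'.2 arista.2.1 then st'
      else (st'.1 ++ [arista.2.1], PySem.Set.add st'.2 arista.2.1)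
    else if arista.2.1 = nodo then
      if PySem.Set.contains st'.2 arista.1 then st'
      else (st'.1 ++ [arista.1], PySem.Set.add st'.2 arista.1)
    else st') st

-- 'while cola: nodo = cola.pop(0); …'; fuel 1 + 2*len(grafo) bounds the number of
-- iterations (every dequeued node was enqueued once, distinct, drawn from edge endpoints
-- plus the start node); on fuel-out it returns visitados just like the empty-queue exit.
def bfsLoopA (grafo : List (Int × Int × Int)) : Nat → List Int → PySem.Set Int → PySem.Set Int
  | 0, _, visitados => visitados
  | _+1, [], visitados => visitados
  | fuel+1, nodo :: cola, visitados =>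
    let st := bfsScan grafo nodo (cola, visitados)
    bfsLoopA grafo fuel st.1 st.2

def bfsA (grafo : List (Int × Int × Int)) (inicio : Int) (nodos_a_visitar : List Int) : List Int :=
  let visitados := PySem.Set.add PySem.Set.empty inicio
  let visitados' := bfsLoopA grafo (1 + 2 * grafo.length) [inicio] visitados
  nodos_a_visitar.filter (fun nodo => !(PySem.Set.contains visitados' nodo))

def aereopuertos (destinos : Int) (cost : Int) (lista_aristas : List (Int × Int × Int)) : Int × Int :=
  let lista := PySem.List.pyRange 1 (destinos + 1) 1
  -- lista_aristas[0][0]; Pre_ excludes the empty list, where Python raises IndexError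
  let inicio := (PySem.List.pyGetD lista_aristas 0 (0, 0, 0)).1
  let desconectados := bfsA lista_aristas inicio lista
  -- 'for location in desconectados: costo += cost; num += 1' (A's 'total' is unused dead code)
  let cn := desconectados.foldl (fun (p : Int × Int) _ => (p.1 + cost, p.2 + 1)) ((0 : Int), (0 : Int))
  let kr := kruskalA (PySem.List.len lista) lista_aristas
  (cn.1 + kr.1 + cost, cn.2)

-- ===== PORT B =====

-- _find(padre, i): iterative; same fuel convention as A's recursive encontrar.
def findAlt : Nat → List Int → Int → Int
  | 0, _, i => i
  | fuel+1, padre, i =>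
    if PySem.List.pyGetD padre i 0 = i then i
    else findAlt fuel padre (PySem.List.pyGetD padre i 0)

def unionAlt (padre rango : List Int) (x y : Int) : List Int × List Int :=
  let x_raiz := findAlt padre.length padre x
  let y_raiz := findAlt padre.length padre y
  if PySem.List.pyGetD rango x_raiz 0 < PySem.List.pyGetD rango y_raiz 0 then
    (PySem.List.pySetD padre x_raiz y_raiz, rango)
  else if PySem.List.pyGetD rango y_raiz 0 < PySem.List.pyGetD rango x_raiz 0 then
    (PySem.List.pySetD padre y_raiz x_raiz, rango)
  else
    (PySem.List.pySetD padre y_raiz x_raiz,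
     PySem.List.pySetD rango x_raiz (PySem.List.pyGetD rango x_raiz 0 + 1))

-- adj.setdefault(u, []).append(v) is d[u] = d.get(u, []) + [v], i.e. Dict.modify
def buildAdj (edges : List (Int × Int × Int)) : PySem.Dict Int (List Int) :=
  edges.foldl (fun adj a =>
    (adj.modify a.1 [] (· ++ [a.2.1])).modify a.2.1 [] (· ++ [a.1])) PySem.Dict.empty

-- the inner 'for vecino in adj[nodo]' loop
def pushAll (vecinos : List Int) (st : List Int × PySem.Set Int) : List Int × PySem.Set Int :=
  vecinos.foldl (fun st' vecino =>
    if PySem.Set.contains st'.2 vecino then st'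
    else (st'.1 ++ [vecino], PySem.Set.add st'.2 vecino)) st

-- 'while head < len(cola)'; adj[nodo] ported as getD nodo [] (exact: every dequeued node
-- is a key of adj or the loop body is empty); same fuel convention as A's BFS loop.
def bfsLoopAlt (adj : PySem.Dict Int (List Int)) : Nat → List Int → Nat → PySem.Set Int → PySem.Set Int
  | 0, _, _, visitados => visitados
  | fuel+1, cola, head, visitados =>
    if head < cola.length then
      let nodo := cola.getD head 0
      let st := pushAll (adj.getD nodo []) (cola, visitados)
      bfsLoopAlt adj fuel st.1 (head + 1) st.2
    else visitados

-- the 'for u, v, w in sorted(...)' loop with break, accumulating (total, escogidas)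
def kloopAlt (destinos : Int) : List (Int × Int × Int) → List Int → List Int → Int → Int → Int × Int
  | [], _, _, total, escogidas => (total, escogidas)
  | (u, v, w) :: tl, padre, rango, total, escogidas =>
    if destinos - 1 ≤ escogidas then (total, escogidas)
    else
      let x := findAlt padre.length padre u
      let y := findAlt padre.length padre v
      if x ≠ y then
        let pr := unionAlt padre rango x y
        kloopAlt destinos tl pr.1 pr.2 (total + w) (escogidas + 1)
      else kloopAlt destinos tl padre rango total escogidas

def aereopuertos_alt (destinos : Int) (cost : Int) (lista_aristas : List (Int × Int × Int)) : Int × Int :=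
  let adj := buildAdj lista_aristas
  let inicio := (PySem.List.pyGetD lista_aristas 0 (0, 0, 0)).1
  let visitados := bfsLoopAlt adj (1 + 2 * lista_aristas.length) [inicio] 0
      (PySem.Set.add PySem.Set.empty inicio)
  let num := (PySem.List.pyRange 1 (destinos + 1) 1).foldl
      (fun n nodo => if PySem.Set.contains visitados nodo then n else n + 1) (0 : Int)
  let padre := PySem.List.pyRange 0 (destinos + 1) 1
  let rango := PySem.List.pyRepeat [(0 : Int)] (destinos + 1)
  let tc := kloopAlt destinos (PySem.List.sorted lista_aristas (fun a => a.2.2) false) padre rango 0 0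
  (cost * num + tc.1 + cost, num)

-- ===== PRECONDITION & SPEC =====

-- Pre_ excludes (i) the empty edge list, where A raises IndexError on lista_aristas[0][0],
-- and (ii) for destinos ≥ 2 (so Kruskal's loop actually runs), edge endpoints outside
-- [-(destinos+1), destinos], on which A's kruskal normally raises IndexError indexing
-- padre — except that when Kruskal stops early (enough edges already chosen) before
-- reaching the out-of-range endpoint A still returns, and B returns the same value
-- there (see the cite in the claim).
def Pre_aereopuertos (destinos : Int) (cost : Int) (lista_aristas : List (Int × Int × Int)) : Prop :=
  lista_aristas ≠ [] ∧ (destinos ≤ 1 ∨ ∀ a ∈ lista_aristas,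
    (-(destinos + 1) ≤ a.1 ∧ a.1 ≤ destinos) ∧ (-(destinos + 1) ≤ a.2.1 ∧ a.2.1 ≤ destinos))
instance (destinos : Int) (cost : Int) (lista_aristas : List (Int × Int × Int)) : Decidable (Pre_aereopuertos destinos cost lista_aristas) := by unfold Pre_aereopuertos; infer_instance

def pvWitness_aereopuertos : Int × Int × (List (Int × Int × Int)) := (2, 3, [(1, 2, 5)])

def Spec_aereopuertos (destinos : Int) (cost : Int) (lista_aristas : List (Int × Int × Int)) (out : Int × Int) : Prop := out = aereopuertos_alt destinos cost lista_aristas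
instance (destinos : Int) (cost : Int) (lista_aristas : List (Int × Int × Int)) (out : Int × Int) : Decidable (Spec_aereopuertos destinos cost lista_aristas out) := by unfold Spec_aereopuertos; infer_instance

-- ===== CLAIM (what is proved, stated in full; the proofs are below) =====
def Claim_equal_aereopuertos : Prop := ∀ (destinos : Int) (cost : Int) (lista_aristas : List (Int × Int × Int)), Dom_aereopuertos destinos cost lista_aristas → Pre_aereopuertos destinos cost lista_aristas → Spec_aereopuertos destinos cost lista_aristas (aereopuertos destinos cost lista_aristas)

-- ===== LEMMAS AND PROOFS =====

theorem find_eq (fuel : Nat) : ∀ (padre : List Int) (i : Int),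
    findAlt fuel padre i = encontrar fuel padre i := by
  induction fuel with
  | zero => intro padre i; rfl
  | succ f ih =>
    intro padre i
    simp only [findAlt, encontrar]
    split_ifs with h
    · rfl
    · exact ih padre _

theorem union_eq (padre rango : List Int) (x y : Int) :
    unionAlt padre rango x y = unionUF padre rango x y := by
  simp only [unionAlt, unionUF, find_eq]

-- Kruskal bisimulation: B's (total, escogidas) accumulators track the weight sum and
-- length of A's resultado list.
theorem kloop_eq (d : Int) : ∀ (rest : List (Int × Int × Int)) (padre rango : List Int)
    (resultado : List (Int × Int × Int)),
    kloopAlt d rest padre rango ((resultado.map (fun a => a.2.2)).sum) (resultado.length : Int)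
      = (((kruskalLoop d rest padre rango (resultado.length : Int) resultado).map (fun a => a.2.2)).sum,
         ((kruskalLoop d rest padre rango (resultado.length : Int) resultado).length : Int)) := by
  intro rest
  induction rest with
  | nil => intro padre rango resultado; rfl
  | cons a tl ih =>
    intro padre rango resultado
    obtain ⟨u, v, w⟩ := a
    simp only [kloopAlt, kruskalLoop]
    by_cases hg : (resultado.length : Int) < d - 1
    · rw [if_neg (by omega), if_pos hg]
      rw [find_eq, find_eq]
      by_cases hxy : encontrar padre.length padre u = encontrar padre.length padre v
      · rw [if_neg (by simpa using hxy), if_neg (by simpa using hxy)]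
        exact ih padre rango resultado
      · rw [if_pos (by simpa using hxy), if_pos (by simpa using hxy)]
        rw [union_eq]
        have := ih (unionUF padre rango (encontrar padre.length padre u)
            (encontrar padre.length padre v)).1
          (unionUF padre rango (encontrar padre.length padre u)
            (encontrar padre.length padre v)).2 (resultado ++ [(u, v, w)])
        simpa [List.map_append, List.sum_append, Int.add_comm] using this
    · rw [if_pos (by omega), if_neg hg]

-- neighbours of nodo in edge order, as A's per-edge scan produces them (a self-loop
-- contributes its endpoint twice; it is already visited, so both sides skip it)
def nbrs (nodo : Int) (edges : List (Int × Int × Int)) : List Int :=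
  edges.flatMap (fun a =>
    (if a.1 = nodo then [a.2.1] else []) ++ (if a.2.1 = nodo then [a.1] else []))

theorem nbrs_cons (nodo : Int) (a : Int × Int × Int) (tl : List (Int × Int × Int)) :
    nbrs nodo (a :: tl)
      = ((if a.1 = nodo then [a.2.1] else []) ++ (if a.2.1 = nodo then [a.1] else []))
        ++ nbrs nodo tl := by
  simp [nbrs]

theorem adjStep_getD (d : PySem.Dict Int (List Int)) (a : Int × Int × Int) (k : Int) :
    ((d.modify a.1 [] (· ++ [a.2.1])).modify a.2.1 [] (· ++ [a.1])).getD k []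
      = d.getD k [] ++ ((if a.1 = k then [a.2.1] else []) ++ (if a.2.1 = k then [a.1] else [])) := by
  by_cases h2 : k = a.2.1 <;> by_cases h1 : k = a.1 <;>
    simp [PySem.Dict.getD_modify, h1, h2, eq_comm] <;>
    split_ifs with h <;> simp_all

theorem buildAdj_getD (k : Int) : ∀ (edges : List (Int × Int × Int))
    (d : PySem.Dict Int (List Int)),
    (edges.foldl (fun adj a =>
      (adj.modify a.1 [] (· ++ [a.2.1])).modify a.2.1 [] (· ++ [a.1])) d).getD k []
      = d.getD k [] ++ nbrs k edges := by
  intro edges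
  induction edges with
  | nil => intro d; simp [nbrs]
  | cons a tl ih =>
    intro d
    rw [List.foldl_cons, ih, nbrs_cons, ← List.append_assoc]
    congr 1
    exact adjStep_getD d a k

theorem getD_buildAdj (edges : List (Int × Int × Int)) (k : Int) :
    (buildAdj edges).getD k [] = nbrs k edges := by
  have := buildAdj_getD k edges PySem.Dict.empty
  simpa [buildAdj] using this

theorem pushAll_cons (v : Int) (tl : List Int) (c : List Int) (vis : PySem.Set Int) :
    pushAll (v :: tl) (c, vis)
      = pushAll tl (if PySem.Set.contains vis v then (c, vis)
                    else (c ++ [v], PySem.Set.add vis v)) := by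
  by_cases h : PySem.Set.contains vis v <;> simp [pushAll]

theorem pushAll_append (l1 l2 : List Int) (st : List Int × PySem.Set Int) :
    pushAll (l1 ++ l2) st = pushAll l2 (pushAll l1 st) := by
  simp [pushAll, List.foldl_append]

theorem pushAll_inv : ∀ (N : List Int) (c : List Int) (vis : PySem.Set Int),
    (∀ x ∈ c, x ∈ vis) → ∀ x ∈ (pushAll N (c, vis)).1, x ∈ (pushAll N (c, vis)).2 := by
  intro N
  induction N with
  | nil => intro c vis h; exact h
  | cons v tl ih =>
    intro c vis h
    rw [pushAll_cons]
    split_ifs with hc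
    · exact ih c vis h
    · refine ih (c ++ [v]) (PySem.Set.add vis v) ?_
      intro x hx
      rcases List.mem_append.1 hx with hx | hx
      · exact (PySem.Set.mem_add _ _ _).2 (Or.inl (h x hx))
      · simp only [List.mem_singleton] at hx
        exact (PySem.Set.mem_add _ _ _).2 (Or.inr hx)

-- the appended suffix and the final visited set of the inner loop do not depend on the
-- queue prefix it appends to
theorem pushAll_shape : ∀ (N : List Int) (c : List Int) (vis : PySem.Set Int),
    pushAll N (c, vis) = (c ++ (pushAll N ([], vis)).1, (pushAll N ([], vis)).2) := by
  intro N
  induction N with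
  | nil => intro c vis; simp [pushAll]
  | cons v tl ih =>
    intro c vis
    rw [pushAll_cons, pushAll_cons]
    split_ifs with hc
    · exact ih c vis
    · rw [ih (c ++ [v]), ih ([] ++ [v])]
      simp

theorem bfsScan_cons (a : Int × Int × Int) (tl : List (Int × Int × Int)) (nodo : Int)
    (st : List Int × PySem.Set Int) :
    bfsScan (a :: tl) nodo st
      = bfsScan tl nodo
          (if a.1 = nodo then
            (if PySem.Set.contains st.2 a.2.1 then st
             else (st.1 ++ [a.2.1], PySem.Set.add st.2 a.2.1))
          else if a.2.1 = nodo then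
            (if PySem.Set.contains st.2 a.1 then st
             else (st.1 ++ [a.1], PySem.Set.add st.2 a.1))
          else st) := by
  by_cases h1 : a.1 = nodo <;> by_cases h2 : a.2.1 = nodo <;>
    simp only [bfsScan, List.foldl_cons, h1, h2, if_pos]

-- A's edge scan for nodo equals B's walk of nodo's adjacency list, provided nodo is
-- already visited (true for every dequeued node)
theorem scan_eq : ∀ (edges : List (Int × Int × Int)) (nodo : Int) (c : List Int)
    (vis : PySem.Set Int), nodo ∈ vis →
    bfsScan edges nodo (c, vis) = pushAll (nbrs nodo edges) (c, vis) := by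
  intro edges
  induction edges with
  | nil => intro nodo c vis _; rfl
  | cons a tl ih =>
    intro nodo c vis hn
    rw [bfsScan_cons, nbrs_cons, pushAll_append]
    by_cases h1 : a.1 = nodo
    · by_cases h2 : a.2.1 = nodo
      · -- self loop at nodo: both endpoints already visited, nothing happens
        have hcv : PySem.Set.contains vis a.2.1 = true := by
          rw [PySem.Set.contains_iff, h2]; exact hn
        have hcu : PySem.Set.contains vis a.1 = true := by
          rw [PySem.Set.contains_iff, h1]; exact hn
        rw [if_pos h1, if_pos hcv]
        rw [show ((if a.1 = nodo then [a.2.1] else []) ++ if a.2.1 = nodo then [a.1] else [])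
            = [a.2.1, a.1] by simp [h1, h2]]
        rw [pushAll_cons, if_pos hcv, pushAll_cons, if_pos hcu]
        exact ih nodo c vis hn
      · rw [if_pos h1]
        rw [show ((if a.1 = nodo then [a.2.1] else []) ++ if a.2.1 = nodo then [a.1] else [])
            = [a.2.1] by simp [h1, h2]]
        rw [pushAll_cons]
        split_ifs with hc
        · exact ih nodo c vis hn
        · exact ih nodo _ _ ((PySem.Set.mem_add _ _ _).2 (Or.inl hn))
    · by_cases h2 : a.2.1 = nodo
      · rw [if_neg h1, if_pos h2]
        rw [show ((if a.1 = nodo then [a.2.1] else []) ++ if a.2.1 = nodo then [a.1] else [])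
            = [a.1] by simp [h1, h2]]
        rw [pushAll_cons]
        split_ifs with hc
        · exact ih nodo c vis hn
        · exact ih nodo _ _ ((PySem.Set.mem_add _ _ _).2 (Or.inl hn))
      · rw [if_neg h1, if_neg h2]
        rw [show ((if a.1 = nodo then [a.2.1] else []) ++ if a.2.1 = nodo then [a.1] else [])
            = ([] : List Int) by simp [h1, h2]]
        exact ih nodo c vis hn

-- BFS bisimulation: A's queue is B's queue from the head index on
theorem bfs_bisim (edges : List (Int × Int × Int)) : ∀ (fuel : Nat) (cola : List Int)
    (head : Nat) (vis : PySem.Set Int), (∀ x ∈ cola, x ∈ vis) →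
    bfsLoopAlt (buildAdj edges) fuel cola head vis = bfsLoopA edges fuel (cola.drop head) vis := by
  intro fuel
  induction fuel with
  | zero => intro cola head vis _; cases cola.drop head <;> rfl
  | succ f ih =>
    intro cola head vis hinv
    by_cases h : head < cola.length
    · have hdrop : cola.drop head = cola[head] :: cola.drop (head + 1) :=
        List.drop_eq_getElem_cons h
      rw [hdrop]
      simp only [bfsLoopAlt, if_pos h, bfsLoopA]
      have hnodo : cola.getD head 0 = cola[head] := List.getD_eq_getElem cola 0 h
      rw [hnodo, getD_buildAdj]
      have hmem : cola[head] ∈ vis := hinv _ (cola.getElem_mem h)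
      rw [scan_eq edges cola[head] _ vis hmem]
      rw [pushAll_shape (nbrs cola[head] edges) cola vis,
          pushAll_shape (nbrs cola[head] edges) (cola.drop (head + 1)) vis]
      have hrw : (cola ++ (pushAll (nbrs cola[head] edges) ([], vis)).1).drop (head + 1)
          = cola.drop (head + 1) ++ (pushAll (nbrs cola[head] edges) ([], vis)).1 :=
        List.drop_append_of_le_length (by omega)
      rw [← hrw]
      refine ih _ _ _ ?_
      intro x hx
      have := pushAll_inv (nbrs cola[head] edges) cola vis hinv
      rw [pushAll_shape] at this
      exact this x hx
    · have hdrop : cola.drop head = [] := List.drop_eq_nil_of_le (by omega)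
      rw [hdrop]
      simp [bfsLoopAlt, if_neg h, bfsLoopA]

theorem length_pyRange_one (a b : Int) : (PySem.List.pyRange a b 1).length = (b - a).toNat := by
  simp [PySem.List.pyRange]
  omega


theorem num_count (vis : PySem.Set Int) (l : List Int) :
    l.foldl (fun n nodo => if PySem.Set.contains vis nodo then n else n + 1) (0 : Int)
      = ((l.filter (fun n => !(PySem.Set.contains vis n))).length : Int) := by
  have hbody : (fun (n : Int) (nodo : Int) => if PySem.Set.contains vis nodo then n else n + 1)
      = (fun (n : Int) (nodo : Int) => if (!(PySem.Set.contains vis nodo)) = true then n + 1 else n) := by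
    funext n nodo
    cases h : PySem.Set.contains vis nodo <;> simp
  rw [hbody, PySem.List.foldl_if_add_one]
  simp [List.countP_eq_length_filter]

theorem cn_closed (c : Int) (l : List Int) :
    l.foldl (fun (p : Int × Int) _ => (p.1 + c, p.2 + 1)) ((0 : Int), (0 : Int))
      = ((l.length : Int) * c, (l.length : Int)) := by
  rw [PySem.List.foldl_prod_mk (f := fun (a : Int) (_ : Int) => a + c)
      (g := fun (a : Int) (_ : Int) => a + 1)]
  rw [PySem.List.foldl_add (g := fun (_ : Int) => c), PySem.List.foldl_add (g := fun (_ : Int) => (1 : Int))]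
  simp

-- when at most one vertex is available the selection loops of both sides stop at once
theorem kruskalLoop_stop (v : Int) (hv : v ≤ 1) (rest : List (Int × Int × Int))
    (padre rango : List Int) : kruskalLoop v rest padre rango 0 [] = [] := by
  cases rest with
  | nil => rfl
  | cons a tl =>
    obtain ⟨u, vv, w⟩ := a
    simp only [kruskalLoop]
    rw [if_neg (by omega)]

theorem kloopAlt_stop (d : Int) (hd : d ≤ 1) (rest : List (Int × Int × Int))
    (padre rango : List Int) : kloopAlt d rest padre rango 0 0 = (0, 0) := by
  cases rest with
  | nil => rfl
  | cons a tl =>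
    obtain ⟨u, vv, w⟩ := a
    simp only [kloopAlt]
    rw [if_pos (by omega)]

-- ===== VERDICT (by name: the statement is the Claim_ definition above) =====
theorem aereopuertos_spec : Claim_equal_aereopuertos := by
  intro d c E _ hpre
  obtain ⟨hne, hrest⟩ := hpre
  unfold Spec_aereopuertos aereopuertos aereopuertos_alt bfsA kruskalA
  simp only []
  -- the two BFS visited sets coincide
  have hvis : bfsLoopAlt (buildAdj E) (1 + 2 * E.length) [(PySem.List.pyGetD E 0 (0, 0, 0)).1] 0
        (PySem.Set.empty.add (PySem.List.pyGetD E 0 (0, 0, 0)).1)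
      = bfsLoopA E (1 + 2 * E.length) [(PySem.List.pyGetD E 0 (0, 0, 0)).1]
        (PySem.Set.empty.add (PySem.List.pyGetD E 0 (0, 0, 0)).1) := by
    have h := bfs_bisim E (1 + 2 * E.length) [(PySem.List.pyGetD E 0 (0, 0, 0)).1] 0
      (PySem.Set.empty.add (PySem.List.pyGetD E 0 (0, 0, 0)).1) ?_
    · simpa using h
    · intro x hx
      simp only [List.mem_singleton] at hx
      exact (PySem.Set.mem_add _ _ _).2 (Or.inr hx)
  rw [hvis]
  by_cases hd : 0 ≤ d
  · -- A feeds kruskal vertices = len(lista) = destinos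
    have hlen : PySem.List.len (PySem.List.pyRange 1 (d + 1)) = d := by
      rw [PySem.List.len_eq, length_pyRange_one]
      omega
    rw [hlen]
    -- Kruskal: B accumulates what A re-derives from resultado
    have hkr := kloop_eq d (PySem.List.sorted E (fun item => item.2.2) false)
        (PySem.List.pyRange 0 (d + 1)) (PySem.List.pyRepeat [(0 : Int)] (d + 1)) []
    simp only [List.map_nil, List.sum_nil, List.length_nil, Int.natCast_zero] at hkr
    rw [hkr, cn_closed, num_count,
        PySem.List.foldl_add (g := fun (a : Int × Int × Int) => a.2.2)]
    refine Prod.ext ?_ ?_ <;> simp <;> ring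
  · -- destinos < 0: lista is empty, both selection loops stop at once
    have hlen : PySem.List.len (PySem.List.pyRange 1 (d + 1)) = 0 := by
      rw [PySem.List.len_eq, length_pyRange_one]
      omega
    rw [hlen, kruskalLoop_stop 0 (by omega), kloopAlt_stop d (by omega), cn_closed, num_count]
    refine Prod.ext ?_ ?_ <;> simp <;> ring
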